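-- pv_equiv track=rewrite | github.com/lorainemg/daa | Problem 2/Code/Solutions/recursive.py | solve
-- ===== SOURCE A (Python) =====
-- def solve(dif, pos, k, count):
--     if pos == len(dif) - 1:
--         if (dif[pos] == 0 or dif[pos] == 1) and k == 0:
--             return 1
--         if k == 1 and dif[pos] == 2:
--             return 1
--         if dif[pos] == k:
--             return 1
--         return 0
--
--     tmp = 0
--     if dif[pos] == k:
--         tmp += solve(dif, pos + 1, k, count)
--         n = dif[pos] + 1
--         for j in range(1, n):
--             tmp += j*k*solve(dif, pos + 1, k - j, count)
--             #count += j*k*solve(dif, pos + 1, k , count)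
--         return tmp
--     elif dif[pos] < k:
--         return (k - dif[pos])*solve(dif, pos + 1, dif[pos], count)
--     else:
--         tmp += solve(dif, pos + 1, dif[pos], count)
--         rg = range(1,2) if k == 0 else range(1, k+1)
--         for i in rg:
--             tmp += i*(k+1)*solve(dif, pos + 1, dif[pos] - i, count)
--     return tmp
-- ===== SOURCE B (Python) =====
-- def solve(dif, pos, k, count):
--     # Forward pass: propagate a frontier dict {k-state: weight} across positions,
--     # merging equal k-states, instead of A's branching recursion.
--     n = len(dif)
--     frontier = {k: 1}
--     p = pos
--     while p != n - 1:
--         d = dif[p]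
--         new = {}
--         for kk, w in frontier.items():
--             if d == kk:
--                 new[kk] = new.get(kk, 0) + w
--                 for j in range(1, d + 1):
--                     new[kk - j] = new.get(kk - j, 0) + w * j * kk
--             elif d < kk:
--                 new[d] = new.get(d, 0) + w * (kk - d)
--             else:
--                 new[d] = new.get(d, 0) + w
--                 rg = range(1, 2) if kk == 0 else range(1, kk + 1)
--                 for i in rg:
--                     new[d - i] = new.get(d - i, 0) + w * i * (kk + 1)
--         frontier = new
--         p += 1
--     d = dif[p]
--     total = 0
--     for kk, w in frontier.items():
--         if ((d == 0 or d == 1) and kk == 0) or (kk == 1 and d == 2) or d == kk: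
--             total += w
--     return total
-- ===== Notes on version B (the rewrite author's own statement) =====
-- stated objective: alternative
-- what changed: Replaces A's branching recursion over positions by a single forward pass that propagates a frontier dictionary mapping each reachable k-state to its accumulated weight, merging equal states at every position.
import Mathlib
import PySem

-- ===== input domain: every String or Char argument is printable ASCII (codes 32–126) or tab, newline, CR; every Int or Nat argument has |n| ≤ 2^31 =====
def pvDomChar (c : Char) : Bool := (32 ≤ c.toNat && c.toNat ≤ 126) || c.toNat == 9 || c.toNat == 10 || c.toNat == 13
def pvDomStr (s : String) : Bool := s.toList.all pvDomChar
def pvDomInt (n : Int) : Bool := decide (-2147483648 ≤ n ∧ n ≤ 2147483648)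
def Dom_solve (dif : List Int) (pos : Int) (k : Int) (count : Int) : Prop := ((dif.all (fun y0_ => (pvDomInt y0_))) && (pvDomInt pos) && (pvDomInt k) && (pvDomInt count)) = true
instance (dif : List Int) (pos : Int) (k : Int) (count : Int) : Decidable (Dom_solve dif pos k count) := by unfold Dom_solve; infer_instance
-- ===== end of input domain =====

-- B replaces A's branching recursion by a single forward pass propagating a frontier
-- dictionary (k-state → accumulated weight), merging equal states (alternative algorithm).

-- ===== PORT A =====
-- Literal transliteration of A's recursion; the Nat fuel only makes the recursion
-- structural (inside Pre_solve it never runs out), everything else mirrors A line by line.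
def solveA_go (dif : List Int) (count : Int) : Nat → Int → Int → Int
  | 0, _, _ => 0
  | fuel+1, pos, k =>
    if pos = (dif.length : Int) - 1 then
      match PySem.List.pyGet? dif pos with
      | none => 0      -- IndexError in Python: outside Pre_solve
      | some d =>
        if (d = 0 ∨ d = 1) ∧ k = 0 then 1
        else if k = 1 ∧ d = 2 then 1
        else if d = k then 1
        else 0
    else
      match PySem.List.pyGet? dif pos with
      | none => 0      -- IndexError in Python: outside Pre_solve
      | some d =>
        if d = k then
          (PySem.List.pyRange 1 (d+1)).foldl
            (fun tmp j => tmp + j * k * solveA_go dif count fuel (pos+1) (k-j))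
            (0 + solveA_go dif count fuel (pos+1) k)
        else if d < k then
          (k - d) * solveA_go dif count fuel (pos+1) d
        else
          (if k = 0 then PySem.List.pyRange 1 2 else PySem.List.pyRange 1 (k+1)).foldl
            (fun tmp i => tmp + i * (k+1) * solveA_go dif count fuel (pos+1) (d-i))
            (0 + solveA_go dif count fuel (pos+1) d)

def solve (dif : List Int) (pos : Int) (k : Int) (count : Int) : Int :=
  solveA_go dif count (((dif.length : Int) - pos).toNat + 1) pos k

-- ===== PORT B =====
-- new[key] = new.get(key, 0) + w
def addW (D : PySem.Dict Int Int) (key w : Int) : PySem.Dict Int Int :=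
  D.insert key (D.getD key 0 + w)

-- the body of B's `for kk, w in frontier.items()` loop
def stepEntry (d : Int) (new : PySem.Dict Int Int) (kw : Int × Int) : PySem.Dict Int Int :=
  if d = kw.1 then
    (PySem.List.pyRange 1 (d+1)).foldl
      (fun acc j => addW acc (kw.1 - j) (kw.2 * j * kw.1)) (addW new kw.1 kw.2)
  else if d < kw.1 then
    addW new d (kw.2 * (kw.1 - d))
  else
    (if kw.1 = 0 then PySem.List.pyRange 1 2 else PySem.List.pyRange 1 (kw.1+1)).foldl
      (fun acc i => addW acc (d - i) (kw.2 * i * (kw.1 + 1))) (addW new d kw.2)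

-- one iteration of B's while loop: build the next frontier
def stepB (d : Int) (F : PySem.Dict Int Int) : PySem.Dict Int Int :=
  F.items.foldl (stepEntry d) PySem.Dict.empty

-- B's while loop; the step count is (n-1-pos).toNat, none = the IndexError Python raises
def solveB_go (dif : List Int) : Nat → Int → PySem.Dict Int Int → Option (PySem.Dict Int Int)
  | 0, _, F => some F
  | steps+1, p, F =>
    match PySem.List.pyGet? dif p with
    | none => none
    | some d => solveB_go dif steps (p+1) (stepB d F)

def solve_alt (dif : List Int) (pos : Int) (k : Int) (count : Int) : Int :=
  let steps := ((dif.length : Int) - 1 - pos).toNat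
  match solveB_go dif steps pos (PySem.Dict.empty.insert k 1) with
  | none => 0
  | some F =>
    match PySem.List.pyGet? dif (pos + steps) with
    | none => 0
    | some d =>
      F.items.foldl (fun tot (kw : Int × Int) =>
        if ((d = 0 ∨ d = 1) ∧ kw.1 = 0) ∨ (kw.1 = 1 ∧ d = 2) ∨ d = kw.1
        then tot + kw.2 else tot) 0

-- ===== PRECONDITION & SPEC =====
-- Pre_solve: exactly the inputs on which A returns (otherwise Python raises IndexError:
-- empty dif, or pos outside the valid (possibly negative) index range).
def Pre_solve (dif : List Int) (pos : Int) (k : Int) (count : Int) : Prop :=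
  dif ≠ [] ∧ -(dif.length : Int) ≤ pos ∧ pos ≤ (dif.length : Int) - 1
instance (dif : List Int) (pos : Int) (k : Int) (count : Int) : Decidable (Pre_solve dif pos k count) := by unfold Pre_solve; infer_instance

def pvWitness_solve : List Int × Int × Int × Int := ([1, 2, 0], -3, 2, 0)

def Spec_solve (dif : List Int) (pos : Int) (k : Int) (count : Int) (out : Int) : Prop := out = solve_alt dif pos k count
instance (dif : List Int) (pos : Int) (k : Int) (count : Int) (out : Int) : Decidable (Spec_solve dif pos k count out) := by unfold Spec_solve; infer_instance

-- ===== CLAIM (what is proved, stated in full; the proofs are below) =====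
def Claim_equal_solve : Prop := ∀ (dif : List Int) (pos : Int) (k : Int) (count : Int), Dom_solve dif pos k count → Pre_solve dif pos k count → Spec_solve dif pos k count (solve dif pos k count)

-- ===== LEMMAS AND PROOFS =====

-- weighted sum of a frontier against a valuation h of the k-states
def ssum (h : Int → Int) (L : List (Int × Int)) : Int :=
  (L.map (fun p => p.2 * h p.1)).sum

theorem ssum_append (h : Int → Int) (L M : List (Int × Int)) :
    ssum h (L ++ M) = ssum h L + ssum h M := by
  simp [ssum]

-- replacing the (unique) entry for `key` shifts the weighted sum accordingly
theorem ssum_replace (h : Int → Int) :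
    ∀ (L : List (Int × Int)) (key u v : Int),
      (L.map Prod.fst).Nodup → (key, u) ∈ L →
      ssum h (L.map (fun p => if p.1 == key then (key, v) else p))
        = ssum h L - u * h key + v * h key := by
  intro L
  induction L with
  | nil => intro key u v _ hmem; simp at hmem
  | cons p L ih =>
    intro key u v hnd hmem
    rcases p with ⟨k0, w0⟩
    simp only [List.map_cons, List.nodup_cons] at hnd
    by_cases hk : k0 = key
    · subst hk
      have hu : u = w0 := by
        rcases List.mem_cons.mp hmem with h1 | h1
        · injection h1 with h1a h1b
        · exact absurd (List.mem_map.mpr ⟨(k0, u), h1, rfl⟩) hnd.1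
      subst hu
      have htail : List.map (fun p => if p.1 == k0 then (k0, v) else p) L = L := by
        conv_rhs => rw [← List.map_id L]
        apply List.map_congr_left
        intro q hq
        have hq1 : q.1 ≠ k0 := fun he => hnd.1 (List.mem_map.mpr ⟨q, hq, he⟩)
        simp [hq1]
      simp only [ssum, List.map_cons, List.sum_cons]
      rw [htail]
      simp only [beq_self_eq_true, if_true]
      ring
    · have hmem' : (key, u) ∈ L := by
        rcases List.mem_cons.mp hmem with h1 | h1
        · injection h1 with h1a h1b; exact absurd h1a.symm hk
        · exact h1
      have hne : ((k0, w0).1 == key) = false := by simp [hk]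
      simp only [ssum, List.map_cons, List.sum_cons, hne, Bool.false_eq_true, if_false]
      have := ih key u v hnd.2 hmem'
      simp only [ssum] at this
      rw [this]; ring

theorem ssum_addW (h : Int → Int) (D : PySem.Dict Int Int) (key w : Int)
    (hnd : D.keys.Nodup) :
    ssum h (addW D key w).items = ssum h D.items + w * h key := by
  unfold addW
  by_cases hc : D.contains key = true
  · obtain ⟨⟨k1, u⟩, hp, rfl⟩ : ∃ p ∈ D.items, p.1 = key := by
      have := (PySem.Dict.contains_iff_mem_keys D key).mp hc
      simpa [PySem.Dict.keys, List.mem_map] using this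
    have hgd : D.getD k1 0 = u := PySem.Dict.getD_of_mem_items D hp hnd 0
    have hkeys : (D.items.map Prod.fst).Nodup := by
      simpa [PySem.Dict.keys] using hnd
    rw [PySem.Dict.items_insert, if_pos hc, ssum_replace h D.items k1 u _ hkeys hp, hgd]
    ring
  · have hc' : D.contains key = false := by simpa using hc
    rw [PySem.Dict.items_insert_of_not_contains D _ hc', ssum_append,
      PySem.Dict.getD_of_not_contains D 0 hc']
    simp [ssum]

theorem nodup_addW (D : PySem.Dict Int Int) (key w : Int) (hnd : D.keys.Nodup) :
    (addW D key w).keys.Nodup :=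
  PySem.Dict.nodup_keys_insert D key _ hnd

theorem ssum_foldl_addW (h : Int → Int) (key wt : Int → Int) (L : List Int)
    (D : PySem.Dict Int Int) (hnd : D.keys.Nodup) :
    ssum h ((L.foldl (fun acc j => addW acc (key j) (wt j)) D).items)
      = ssum h D.items + (L.map (fun j => wt j * h (key j))).sum ∧
    (L.foldl (fun acc j => addW acc (key j) (wt j)) D).keys.Nodup := by
  induction L generalizing D with
  | nil => simpa using hnd
  | cons j L ih =>
    have h1 := ssum_addW h D (key j) (wt j) hnd
    have h2 := nodup_addW D (key j) (wt j) hnd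
    obtain ⟨e1, e2⟩ := ih (addW D (key j) (wt j)) h2
    refine ⟨?_, e2⟩
    simp only [List.foldl_cons, e1, h1, List.map_cons, List.sum_cons]
    ring

theorem solveA_go_fuel (dif : List Int) (count : Int) :
    ∀ (fuel fuel' : Nat) (pos k : Int),
      ((dif.length : Int) - 1 - pos).toNat < fuel → ((dif.length : Int) - 1 - pos).toNat < fuel' →
      solveA_go dif count fuel pos k = solveA_go dif count fuel' pos k := by
  intro fuel
  induction fuel with
  | zero => intro fuel' pos k hf hf'; omega
  | succ f ih =>
    intro fuel' pos k hf hf'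
    match fuel', hf' with
    | f' + 1, hf' =>
    by_cases hp : pos = (dif.length : Int) - 1
    · simp only [solveA_go, if_pos hp]
    · simp only [solveA_go, if_neg hp]
      cases hgd : PySem.List.pyGet? dif pos with
      | none => rfl
      | some d =>
        have hr : PySem.Raise.InRange dif.length pos := by
          by_contra hcon
          rw [(PySem.List.pyGet?_eq_none_iff dif pos).mpr hcon] at hgd; cases hgd
        have hlt : pos < (dif.length : Int) := hr.2
        have hrec : ∀ k' : Int, solveA_go dif count f (pos+1) k'
            = solveA_go dif count f' (pos+1) k' := by
          intro k'; exact ih f' (pos+1) k' (by omega) (by omega)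
        simp only [hrec]

theorem sum_map_factor (L : List Int) (f g : Int → Int) (w : Int)
    (hfg : ∀ j, f j = w * g j) :
    (L.map f).sum = w * (L.map g).sum := by
  induction L with
  | nil => simp
  | cons x L ih => simp only [List.map_cons, List.sum_cons, hfg, ih]; ring

-- the crux: one frontier step preserves the weighted sum of A-values
theorem ssum_stepEntry (dif : List Int) (count : Int) (fuel : Nat) (pos d : Int)
    (hpos : ¬ pos = (dif.length : Int) - 1) (hget : PySem.List.pyGet? dif pos = some d)
    (new : PySem.Dict Int Int) (hnd : new.keys.Nodup) (kw : Int × Int) :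
    ssum (fun kk => solveA_go dif count fuel (pos+1) kk) (stepEntry d new kw).items
      = ssum (fun kk => solveA_go dif count fuel (pos+1) kk) new.items
        + kw.2 * solveA_go dif count (fuel+1) pos kw.1 ∧
    (stepEntry d new kw).keys.Nodup := by
  rcases kw with ⟨kk, w⟩
  simp only [stepEntry, solveA_go, if_neg hpos, hget]
  split_ifs with h1 h2 h3
  all_goals {
    first
    | (obtain ⟨e1, e2⟩ := ssum_foldl_addW (fun kk => solveA_go dif count fuel (pos+1) kk)
          (fun j => kk - j) (fun j => w * j * kk) (PySem.List.pyRange 1 (d+1))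
          (addW new kk w) (nodup_addW new kk w hnd)
       refine ⟨?_, e2⟩
       rw [e1, ssum_addW _ new kk w hnd, PySem.List.foldl_add,
         sum_map_factor (PySem.List.pyRange 1 (d+1)) _
           (fun j => j * kk * solveA_go dif count fuel (pos+1) (kk - j)) w
           (by intro j; ring)]
       ring)
    | (refine ⟨?_, nodup_addW new d _ hnd⟩
       rw [ssum_addW _ new d _ hnd]; ring)
    | (obtain ⟨e1, e2⟩ := ssum_foldl_addW (fun kk => solveA_go dif count fuel (pos+1) kk)
          (fun i => d - i) (fun i => w * i * (kk + 1)) (PySem.List.pyRange 1 2)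
          (addW new d w) (nodup_addW new d w hnd)
       refine ⟨?_, e2⟩
       rw [e1, ssum_addW _ new d w hnd, PySem.List.foldl_add,
         sum_map_factor (PySem.List.pyRange 1 2) _
           (fun i => i * (kk + 1) * solveA_go dif count fuel (pos+1) (d - i)) w
           (by intro i; ring)]
       ring)
    | (obtain ⟨e1, e2⟩ := ssum_foldl_addW (fun kk => solveA_go dif count fuel (pos+1) kk)
          (fun i => d - i) (fun i => w * i * (kk + 1)) (PySem.List.pyRange 1 (kk+1))
          (addW new d w) (nodup_addW new d w hnd)
       refine ⟨?_, e2⟩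
       rw [e1, ssum_addW _ new d w hnd, PySem.List.foldl_add,
         sum_map_factor (PySem.List.pyRange 1 (kk+1)) _
           (fun i => i * (kk + 1) * solveA_go dif count fuel (pos+1) (d - i)) w
           (by intro i; ring)]
       ring)
  }

theorem ssum_foldl_stepEntry (dif : List Int) (count : Int) (fuel : Nat) (pos d : Int)
    (hpos : ¬ pos = (dif.length : Int) - 1) (hget : PySem.List.pyGet? dif pos = some d) :
    ∀ (L : List (Int × Int)) (acc : PySem.Dict Int Int), acc.keys.Nodup →
      ssum (fun kk => solveA_go dif count fuel (pos+1) kk) ((L.foldl (stepEntry d) acc).items)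
        = ssum (fun kk => solveA_go dif count fuel (pos+1) kk) acc.items
          + ssum (fun kk => solveA_go dif count (fuel+1) pos kk) L ∧
      (L.foldl (stepEntry d) acc).keys.Nodup := by
  intro L
  induction L with
  | nil => intro acc hnd; simpa [ssum] using hnd
  | cons kw L ih =>
    intro acc hnd
    obtain ⟨e1, e2⟩ := ssum_stepEntry dif count fuel pos d hpos hget acc hnd kw
    obtain ⟨e3, e4⟩ := ih (stepEntry d acc kw) e2
    refine ⟨?_, e4⟩
    rw [List.foldl_cons, e3, e1]
    simp only [ssum, List.map_cons, List.sum_cons]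
    ring

theorem ssum_stepB (dif : List Int) (count : Int) (fuel : Nat) (pos d : Int)
    (hpos : ¬ pos = (dif.length : Int) - 1) (hget : PySem.List.pyGet? dif pos = some d)
    (F : PySem.Dict Int Int) :
    ssum (fun kk => solveA_go dif count fuel (pos+1) kk) (stepB d F).items
      = ssum (fun kk => solveA_go dif count (fuel+1) pos kk) F.items ∧
    (stepB d F).keys.Nodup := by
  obtain ⟨e1, e2⟩ := ssum_foldl_stepEntry dif count fuel pos d hpos hget F.items
    PySem.Dict.empty PySem.Dict.nodup_keys_empty
  unfold stepB
  refine ⟨?_, e2⟩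
  rw [e1]
  have : (PySem.Dict.empty : PySem.Dict Int Int).items = [] := rfl
  simp [this, ssum]

theorem solveB_go_spec (dif : List Int) (count : Int) :
    ∀ (steps : Nat) (pos : Int) (F : PySem.Dict Int Int),
      -(dif.length : Int) ≤ pos → pos + steps = (dif.length : Int) - 1 →
      ∃ G, solveB_go dif steps pos F = some G ∧
        ssum (fun kk => solveA_go dif count (steps+1) pos kk) F.items
          = ssum (fun kk => solveA_go dif count 1 ((dif.length : Int) - 1) kk) G.items := by
  intro steps
  induction steps with
  | zero =>
    intro pos F hlo hsum
    have hp : pos = (dif.length : Int) - 1 := by simpa using hsum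
    subst hp
    exact ⟨F, rfl, rfl⟩
  | succ steps ih =>
    intro pos F hlo hsum
    have hcast : pos + ((steps : Int) + 1) = (dif.length : Int) - 1 := by
      simpa [Nat.cast_add] using hsum
    have hpos : ¬ pos = (dif.length : Int) - 1 := by omega
    have hr : PySem.Raise.InRange dif.length pos := ⟨hlo, by omega⟩
    obtain ⟨d, hget⟩ : ∃ d, PySem.List.pyGet? dif pos = some d := by
      cases hg : PySem.List.pyGet? dif pos with
      | none => exact absurd ((PySem.List.pyGet?_eq_none_iff dif pos).mp hg) (by simpa using hr)
      | some d => exact ⟨d, rfl⟩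
    obtain ⟨G, hG, hval⟩ := ih (pos+1) (stepB d F) (by omega) (by omega)
    refine ⟨G, ?_, ?_⟩
    · simp only [solveB_go, hget]; exact hG
    · rw [← hval, ← (ssum_stepB dif count (steps+1) pos d hpos hget F).1]

-- B's final loop computes the weighted sum of A's base-case values
theorem final_foldl (dif : List Int) (count : Int) (d : Int)
    (hget : PySem.List.pyGet? dif ((dif.length : Int) - 1) = some d) :
    ∀ (L : List (Int × Int)) (t : Int),
    L.foldl (fun tot (kw : Int × Int) =>
        if ((d = 0 ∨ d = 1) ∧ kw.1 = 0) ∨ (kw.1 = 1 ∧ d = 2) ∨ d = kw.1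
        then tot + kw.2 else tot) t
      = t + ssum (fun kk => solveA_go dif count 1 ((dif.length : Int) - 1) kk) L := by
  have hval : ∀ kk : Int, solveA_go dif count 1 ((dif.length : Int) - 1) kk
      = if ((d = 0 ∨ d = 1) ∧ kk = 0) ∨ (kk = 1 ∧ d = 2) ∨ d = kk then 1 else 0 := by
    intro kk
    simp only [solveA_go, hget]
    split_ifs <;> try tauto
  intro L
  induction L with
  | nil => intro t; simp [ssum]
  | cons kw L ih =>
    intro t
    simp only [List.foldl_cons, ih, ssum, List.map_cons, List.sum_cons, hval]
    split_ifs <;> ring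

-- ===== VERDICT (by name: the statement is the Claim_ definition above) =====
theorem solve_spec : Claim_equal_solve := by
  intro dif pos k count _hdom hpre
  obtain ⟨hne, hlo, hhi⟩ := hpre
  have hlen : 1 ≤ (dif.length : Int) := by
    have := List.length_pos_iff.mpr hne
    omega
  unfold Spec_solve solve solve_alt
  set steps := ((dif.length : Int) - 1 - pos).toNat with hsteps
  have hsum : pos + (steps : Int) = (dif.length : Int) - 1 := by omega
  obtain ⟨G, hG, hval⟩ := solveB_go_spec dif count steps pos
    (PySem.Dict.empty.insert k 1) hlo hsum
  have hgetlast : ∃ d, PySem.List.pyGet? dif (pos + (steps : Int)) = some d := by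
    cases hg : PySem.List.pyGet? dif (pos + (steps : Int)) with
    | none =>
      have := (PySem.List.pyGet?_eq_none_iff dif (pos + (steps : Int))).mp hg
      exact absurd (⟨by omega, by omega⟩ : PySem.Raise.InRange dif.length (pos + (steps : Int)))
        this
    | some d => exact ⟨d, rfl⟩
  obtain ⟨d, hget⟩ := hgetlast
  simp only [hG, hget]
  have hget' : PySem.List.pyGet? dif ((dif.length : Int) - 1) = some d := by
    rwa [hsum] at hget
  rw [final_foldl dif count d hget' G.items 0, ← hval]
  have hitems : (PySem.Dict.empty.insert k (1:Int)).items = [(k, 1)] := by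
    rw [PySem.Dict.items_insert_of_not_contains PySem.Dict.empty 1
      (PySem.Dict.contains_empty k)]
    rfl
  rw [hitems]
  simp only [ssum, List.map_cons, List.map_nil, List.sum_cons, List.sum_nil]
  rw [solveA_go_fuel dif count (((dif.length : Int) - pos).toNat + 1) (steps+1) pos k
    (by omega) (by omega)]
  ring
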